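-- pv_equiv track=rewrite | github.com/samihsq/slm-agentic-benchmarking | src/benchmarks/skills/instruction_following/matrix_instruction_following.py | L21_edges
-- ===== SOURCE A (Python) =====
-- import copy
--
-- def L21_edges(M):
--     h,w=len(M),len(M[0])
--     out=copy.deepcopy(M)
--     for i in range(h):
--         for j in range(w):
--             if i==0 or j==0 or i==h-1 or j==w-1:
--                 out[i][j]+=1
--     return out
-- ===== SOURCE B (Python) =====
-- def L21_edges(M):
--     h, w = len(M), len(M[0])
--     out = [row[:] for row in M]
--     for j in range(w):
--         out[0][j] += 1
--         if h > 1: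
--             out[h - 1][j] += 1
--     for i in range(1, h - 1):
--         if w > 0:
--             out[i][0] += 1
--         if w > 1:
--             out[i][w - 1] += 1
--     return out
-- ===== Notes on version B (the rewrite author's own statement) =====
-- stated objective: alternative
-- what changed: Instead of A's full h*w raster scan with a border predicate on every cell, B copies the rows and then touches only the perimeter: one loop bumps the top (and, if h>1, bottom) row, and one loop over the interior rows bumps only the first and (if w>1) last column, so no interior cell is ever visited by the update loops.
import Mathlib
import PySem

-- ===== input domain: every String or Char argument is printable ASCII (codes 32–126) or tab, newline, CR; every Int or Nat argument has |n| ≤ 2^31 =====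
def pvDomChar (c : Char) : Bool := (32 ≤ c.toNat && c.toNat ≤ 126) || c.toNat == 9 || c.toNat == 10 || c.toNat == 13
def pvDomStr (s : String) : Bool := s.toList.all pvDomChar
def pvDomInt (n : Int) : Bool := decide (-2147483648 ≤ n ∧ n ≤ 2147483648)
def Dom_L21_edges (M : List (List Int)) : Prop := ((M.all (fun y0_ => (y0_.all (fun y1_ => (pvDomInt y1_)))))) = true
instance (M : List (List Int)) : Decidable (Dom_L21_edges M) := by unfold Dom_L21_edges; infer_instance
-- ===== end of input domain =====

-- B replaces A's full raster scan (border test on every cell) by a perimeter-only traversal: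
-- bump the top/bottom rows, then only the first/last column of the interior rows.

-- ===== PORT A =====
-- literal transliteration of A: h,w from the input, deepcopy, then a full i,j raster
-- scan bumping out[i][j] when (i,j) is on the border. out[i][j] += 1 becomes List.modify
-- (in-range on every input Pre_ admits, exactly where Python does not raise).
def L21_edges (M : List (List Int)) : List (List Int) :=
  let h := M.length
  let w := (M.headD []).length
  (List.range h).foldl (fun out i =>
    (List.range w).foldl (fun out j =>
      if i = 0 ∨ j = 0 ∨ i = h - 1 ∨ j = w - 1 then
        out.modify i (fun row => row.modify j (· + 1))
      else out) out) M

-- ===== PORT B =====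
-- literal transliteration of B: copy the rows, bump the top row (and bottom row if h > 1)
-- cell by cell, then for each interior row i in range(1, h-1) bump out[i][0] (if w > 0)
-- and out[i][w-1] (if w > 1).
def L21_edges_alt (M : List (List Int)) : List (List Int) :=
  let h := M.length
  let w := (M.headD []).length
  let out := M.map (fun row => row)
  let out := (List.range w).foldl (fun out j =>
    let out := out.modify 0 (fun row => row.modify j (· + 1))
    if 1 < h then out.modify (h - 1) (fun row => row.modify j (· + 1)) else out) out
  (List.range' 1 (h - 1 - 1)).foldl (fun out i =>
    let out := if 0 < w then out.modify i (fun row => row.modify 0 (· + 1)) else out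
    if 1 < w then out.modify i (fun row => row.modify (w - 1) (· + 1)) else out) out

-- ===== PRECONDITION & SPEC =====
-- Pre_ excludes exactly the inputs on which Python A raises: the empty matrix
-- (len(M[0]) is an IndexError) and matrices in which some row is shorter than the
-- first row (out[i][j] += 1 then raises IndexError at a border index).
def Pre_L21_edges (M : List (List Int)) : Prop :=
  M ≠ [] ∧ ∀ row ∈ M, (M.headD []).length ≤ row.length
instance (M : List (List Int)) : Decidable (Pre_L21_edges M) := by
  unfold Pre_L21_edges; infer_instance

def pvWitness_L21_edges : List (List Int) := [[1, 2, 3], [4, 5, 6], [7, 8, 9]]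

def Spec_L21_edges (M : List (List Int)) (out : List (List Int)) : Prop := out = L21_edges_alt M
instance (M : List (List Int)) (out : List (List Int)) : Decidable (Spec_L21_edges M out) := by unfold Spec_L21_edges; infer_instance

-- ===== CLAIM (what is proved, stated in full; the proofs are below) =====
def Claim_equal_L21_edges : Prop := ∀ (M : List (List Int)), Dom_L21_edges M → Pre_L21_edges M → Spec_L21_edges M (L21_edges M)

-- ===== LEMMAS AND PROOFS =====

theorem modify_modify_same {α : Type} (l : List α) (i : Nat) (f g : α → α) :
    (l.modify i f).modify i g = l.modify i (fun x => g (f x)) := by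
  apply List.ext_getElem?
  intro k
  simp only [List.getElem?_modify]
  cases l[k]? with
  | none => rfl
  | some x => by_cases h : i = k <;> simp [h]

theorem modify_comm_ne {α : Type} (l : List α) {i j : Nat} (h : i ≠ j) (f g : α → α) :
    (l.modify i f).modify j g = (l.modify j g).modify i f := by
  apply List.ext_getElem?
  intro k
  simp only [List.getElem?_modify]
  cases l[k]? with
  | none => rfl
  | some x =>
    by_cases hi : i = k
    · have hj : ¬ (j = k) := fun hc => h (hi.trans hc.symm)
      simp [hi, hj]
    · by_cases hj : j = k <;> simp [hi, hj]

theorem modify_fun_id {α : Type} (l : List α) (i : Nat) :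
    l.modify i (fun x => x) = l := List.modify_id i l

theorem modify_if_push {α : Type} (l : List α) (i : Nat) (c : Prop) [Decidable c] (f : α → α) :
    (if c then l.modify i f else l) = l.modify i (fun x => if c then f x else x) := by
  split_ifs with h
  · rfl
  · exact (List.modify_id i l).symm

theorem foldl_hoist {α β : Type} (xs : List β) (i : Nat) (g : β → α → α) (out : List α) :
    xs.foldl (fun out b => out.modify i (g b)) out
      = out.modify i (fun row => xs.foldl (fun r b => g b r) row) := by
  induction xs generalizing out with
  | nil => exact (modify_fun_id out i).symm
  | cons b tl ih =>
    simp only [List.foldl_cons]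
    rw [ih, modify_modify_same]

theorem foldl_hoist2 {α β : Type} (xs : List β) {a b : Nat} (hab : a ≠ b)
    (g g' : β → α → α) (out : List α) :
    xs.foldl (fun out x => (out.modify a (g x)).modify b (g' x)) out
      = (out.modify a (fun r => xs.foldl (fun r x => g x r) r)).modify b
          (fun r => xs.foldl (fun r x => g' x r) r) := by
  induction xs generalizing out with
  | nil =>
    simp only [List.foldl_nil]
    rw [modify_fun_id, modify_fun_id]
  | cons c tl ih =>
    simp only [List.foldl_cons]
    rw [ih, modify_comm_ne _ hab, modify_modify_same,
        modify_comm_ne _ (Ne.symm hab), modify_modify_same]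

theorem getElem?_foldl_modify_if {α : Type} (xs : List Nat) (hnd : xs.Nodup)
    (c : Nat → Prop) [DecidablePred c] (f : Nat → α → α) (out : List α) (k : Nat) :
    (xs.foldl (fun out i => if c i then out.modify i (f i) else out) out)[k]?
      = if k ∈ xs ∧ c k then (f k) <$> out[k]? else out[k]? := by
  induction xs generalizing out with
  | nil => simp
  | cons a tl ih =>
    obtain ⟨ha, htl⟩ := List.nodup_cons.mp hnd
    simp only [List.foldl_cons]
    rw [modify_if_push, ih htl]
    simp only [List.getElem?_modify, List.mem_cons]
    by_cases hck : c k
    · by_cases hak : a = k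
      · subst hak
        simp only [ha, or_false, hck, and_true, if_pos]
        simp
      · by_cases hk : k ∈ tl
        · simp only [hk, hck, and_true, or_true, if_pos]
          cases out[k]? <;> simp [hak]
        · have hka : ¬(k = a) := fun h => hak h.symm
          simp only [hk, hck, and_true, hka, false_or, if_neg, not_false_iff]
          cases out[k]? <;> simp [hak]
    · simp only [hck, and_false, if_neg, not_false_iff]
      by_cases hak : a = k
      · subst hak
        cases out[a]? <;> simp [hck]
      · cases out[k]? <;> simp [hak]

theorem getElem?_foldl_modify {α : Type} (xs : List Nat) (hnd : xs.Nodup)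
    (f : Nat → α → α) (out : List α) (k : Nat) :
    (xs.foldl (fun out i => out.modify i (f i)) out)[k]?
      = if k ∈ xs then (f k) <$> out[k]? else out[k]? := by
  have := getElem?_foldl_modify_if xs hnd (fun _ => True) f out k
  simpa using this

-- the interior-row update of A (bump j = 0 and j = w-1 within range w) equals B's
-- two conditional bumps, for every row and width
theorem interior_row (w : Nat) (row : List Int) :
    (List.range w).foldl (fun r j => if j = 0 ∨ j = w - 1 then r.modify j (· + 1) else r) row
      = (if 1 < w then
           (if 0 < w then row.modify 0 (· + 1) else row).modify (w - 1) (· + 1)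
         else (if 0 < w then row.modify 0 (· + 1) else row)) := by
  apply List.ext_getElem?
  intro k
  rw [getElem?_foldl_modify_if _ List.nodup_range _ _ _ _]
  by_cases hw1 : 1 < w
  · have hw0 : 0 < w := by omega
    simp only [hw1, hw0, if_pos, List.getElem?_modify, List.mem_range]
    by_cases hk0 : k = 0
    · subst hk0
      have hne : ¬ (w - 1 = 0) := by omega
      rw [if_pos ⟨hw0, Or.inl rfl⟩]
      cases row[0]? <;> simp [hne]
    · by_cases hkw : k = w - 1
      · subst hkw
        have h1 : ¬ ((0 : Nat) = w - 1) := by omega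
        rw [if_pos ⟨by omega, Or.inr rfl⟩]
        cases row[w-1]? <;> simp [h1]
      · have h1 : ¬ ((0 : Nat) = k) := fun h => hk0 h.symm
        have h2 : ¬ (w - 1 = k) := fun h => hkw h.symm
        have h3 : ¬ (k < w ∧ (k = 0 ∨ k = w - 1)) := by
          rintro ⟨-, h | h⟩ <;> [exact hk0 h; exact hkw h]
        rw [if_neg h3]
        cases row[k]? <;> simp [h1, h2]
  · by_cases hw0 : 0 < w
    · have hw : w = 1 := by omega
      subst hw
      simp only [hw1, if_neg, not_false_iff, if_pos, zero_lt_one, List.getElem?_modify]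
      by_cases hk0 : k = 0
      · subst hk0
        rw [if_pos ⟨by simp, Or.inl rfl⟩]
        cases row[0]? <;> simp
      · have h1 : ¬ ((0 : Nat) = k) := fun h => hk0 h.symm
        have h3 : ¬ (k ∈ List.range 1 ∧ (k = 0 ∨ k = 1 - 1)) := by
          rintro ⟨hm, h | h⟩ <;> exact hk0 (by simp at hm; omega)
        rw [if_neg h3]
        cases row[k]? <;> simp [h1]
    · have hw : w = 0 := by omega
      subst hw
      simp

theorem L21_ports_eq (M : List (List Int)) : L21_edges M = L21_edges_alt M := by
  unfold L21_edges L21_edges_alt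
  simp only [List.map_id_fun', id]
  set h := M.length with hh
  set w := (M.headD []).length with hw
  -- rewrite A's outer loop: each step is a single modify at row i
  have hA : (List.range h).foldl (fun out i =>
      (List.range w).foldl (fun out j =>
        if i = 0 ∨ j = 0 ∨ i = h - 1 ∨ j = w - 1 then
          out.modify i (fun row => row.modify j (· + 1))
        else out) out) M
    = (List.range h).foldl (fun out i => out.modify i (fun row =>
        (List.range w).foldl (fun r j =>
          if i = 0 ∨ j = 0 ∨ i = h - 1 ∨ j = w - 1 then r.modify j (· + 1) else r) row)) M := by
    apply PySem.List.foldl_congr_mem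
    intro out i _
    rw [show (fun (out : List (List Int)) j =>
          if i = 0 ∨ j = 0 ∨ i = h - 1 ∨ j = w - 1 then
            out.modify i (fun row => row.modify j (· + 1)) else out)
        = (fun (out : List (List Int)) j => out.modify i (fun row =>
            if i = 0 ∨ j = 0 ∨ i = h - 1 ∨ j = w - 1 then row.modify j (· + 1) else row))
      from funext fun out => funext fun j => by
        rw [modify_if_push]]
    exact foldl_hoist _ _ _ _
  rw [hA]
  -- rewrite B's second loop: each step is a single modify at row i
  have hB2 : ∀ (L : List (List Int)), (List.range' 1 (h - 1 - 1)).foldl (fun out i =>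
      let out := if 0 < w then out.modify i (fun row => row.modify 0 (· + 1)) else out
      if 1 < w then out.modify i (fun row => row.modify (w - 1) (· + 1)) else out) L
    = (List.range' 1 (h - 1 - 1)).foldl (fun out i => out.modify i (fun row =>
        if 1 < w then
          (if 0 < w then row.modify 0 (· + 1) else row).modify (w - 1) (· + 1)
        else (if 0 < w then row.modify 0 (· + 1) else row))) L := by
    intro L
    apply PySem.List.foldl_congr_mem
    intro out i _
    simp only
    rw [modify_if_push, modify_if_push, modify_modify_same]
  rw [hB2]
  have hnotmem' : ∀ k : Nat, ¬ k < h ∨ k = 0 ∨ k = h - 1 → k ∉ List.range' 1 (h - 1 - 1) := by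
    intro k hk hm
    rcases List.mem_range'.mp hm with ⟨i, hi, he⟩
    omega
  by_cases hh1 : 1 < h
  · -- h ≥ 2: B's first loop is a modify at row 0 and a modify at row h-1
    simp only [if_pos hh1]
    rw [foldl_hoist2 _ (show (0 : Nat) ≠ h - 1 by omega)]
    apply List.ext_getElem?
    intro k
    rw [getElem?_foldl_modify _ List.nodup_range _ _ _,
        getElem?_foldl_modify _ (List.nodup_range' 1) _ _ _]
    simp only [List.getElem?_modify]
    by_cases hkh : k < h
    · by_cases hk0 : k = 0
      · subst hk0
        rw [if_pos (List.mem_range.mpr hkh), if_neg (hnotmem' 0 (Or.inr (Or.inl rfl)))]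
        have hne : ¬ (h - 1 = 0) := by omega
        cases M[0]? <;> simp [hne]
      · by_cases hkh1 : k = h - 1
        · subst hkh1
          rw [if_pos (List.mem_range.mpr hkh), if_neg (hnotmem' _ (Or.inr (Or.inr rfl)))]
          have hne : ¬ ((0 : Nat) = h - 1) := by omega
          cases M[h - 1]? <;> simp [hne]
        · -- interior row
          have hmem' : k ∈ List.range' 1 (h - 1 - 1) :=
            List.mem_range'.mpr ⟨k - 1, by omega, by omega⟩
          rw [if_pos (List.mem_range.mpr hkh), if_pos hmem']
          have hrow : ∀ row : List Int, (List.range w).foldl (fun r j =>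
              if k = 0 ∨ j = 0 ∨ k = h - 1 ∨ j = w - 1 then r.modify j (· + 1) else r) row
            = (if 1 < w then
                 (if 0 < w then row.modify 0 (· + 1) else row).modify (w - 1) (· + 1)
               else (if 0 < w then row.modify 0 (· + 1) else row)) := by
            intro row
            rw [show (fun (r : List Int) j =>
                  if k = 0 ∨ j = 0 ∨ k = h - 1 ∨ j = w - 1 then r.modify j (· + 1) else r)
                = (fun (r : List Int) j =>
                  if j = 0 ∨ j = w - 1 then r.modify j (· + 1) else r)
              from funext fun r => funext fun j => by
                refine if_congr ?_ rfl rfl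
                constructor
                · rintro (hc | hc | hc | hc)
                  · exact absurd hc hk0
                  · exact Or.inl hc
                  · exact absurd hc hkh1
                  · exact Or.inr hc
                · rintro (hc | hc)
                  · exact Or.inr (Or.inl hc)
                  · exact Or.inr (Or.inr (Or.inr hc))]
            exact interior_row w row
          simp only [hrow]
          have h1 : ¬ ((0 : Nat) = k) := fun hc => hk0 hc.symm
          have h2 : ¬ (h - 1 = k) := fun hc => hkh1 hc.symm
          cases M[k]? <;> simp [h1, h2]
    · have hM : M[k]? = none := List.getElem?_eq_none (by omega)
      rw [if_neg (by simp [List.mem_range]; omega), if_neg (hnotmem' k (Or.inl hkh))]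
      simp [hM]
  · -- h ≤ 1: B's first loop is a single modify at row 0, and there are no interior rows
    simp only [if_neg hh1]
    rw [foldl_hoist]
    apply List.ext_getElem?
    intro k
    rw [getElem?_foldl_modify _ List.nodup_range _ _ _,
        getElem?_foldl_modify _ (List.nodup_range' 1) _ _ _]
    simp only [List.getElem?_modify]
    rw [if_neg (hnotmem' k (by omega))]
    by_cases hkh : k < h
    · have hk0 : k = 0 := by omega
      subst hk0
      rw [if_pos (List.mem_range.mpr hkh)]
      cases M[0]? <;> simp
    · have hM : M[k]? = none := List.getElem?_eq_none (by omega)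
      rw [if_neg (by simp [List.mem_range]; omega)]
      simp [hM]

-- ===== VERDICT (by name: the statement is the Claim_ definition above) =====
theorem L21_edges_spec : Claim_equal_L21_edges := by
  intro M _ _
  exact L21_ports_eq M
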